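-- pv_equiv track=rewrite | github.com/willt001/project-euler | solutions/51.py | get_masked_numbers
-- ===== SOURCE A (Python) =====
-- from typing import List
--
-- def get_masked_numbers(num: int) -> List[str]:
--     num = str(num)
--     n = len(num)
--     result = []
--     for bitmask in range(2 ** n):
--         combo = ''
--         replaced = set()
--         for i in range(n):
--             if (bitmask >> i) & 1:
--                 combo += '*'
--                 replaced.add(num[i])
--             else:
--                 combo += num[i]
--         if len(replaced) == 1:
--             result.append(combo)
--     return result
-- ===== SOURCE B (Python) =====
-- from typing import List
--
-- def get_masked_numbers(num: int) -> List[str]: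
--     # Subset-doubling over the characters of str(num): each step doubles the
--     # variant list (keep char / star it), carrying a three-valued state:
--     # None = no star yet, a char = all stars hit that char, '' = conflict.
--     variants = [('', None)]
--     for ch in str(num):
--         variants = ([(t + ch, st) for (t, st) in variants]
--                     + [(t + '*', ch if st is None or st == ch else '')
--                        for (t, st) in variants])
--     return [t for (t, st) in variants if st is not None and st != '']
-- ===== Notes on version B (the rewrite author's own statement) =====
-- stated objective: alternative
-- what changed: Replaced the scan of every bitmask over the digit positions (rebuilding each candidate string and a set of replaced characters per mask) by a subset-doubling pass over the characters of str(num): the variant list is doubled once per character (keep it / star it) while a three-valued state (no star / starred char / conflict) replaces the set, and valid variants are filtered at the end.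
import Mathlib
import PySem

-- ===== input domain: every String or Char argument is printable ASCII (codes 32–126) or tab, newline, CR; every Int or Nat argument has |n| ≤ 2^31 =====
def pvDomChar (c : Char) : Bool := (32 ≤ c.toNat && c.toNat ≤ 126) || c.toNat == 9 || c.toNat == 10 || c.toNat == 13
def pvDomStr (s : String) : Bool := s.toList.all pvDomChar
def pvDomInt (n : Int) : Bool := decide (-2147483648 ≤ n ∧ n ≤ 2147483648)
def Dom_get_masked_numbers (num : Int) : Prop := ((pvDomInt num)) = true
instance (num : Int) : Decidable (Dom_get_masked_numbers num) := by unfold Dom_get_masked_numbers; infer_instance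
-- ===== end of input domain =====

-- B replaces A's scan of every bitmask over the digit positions (per-mask string rebuild + set of replaced chars)
-- by a subset-doubling pass over the characters carrying a three-valued star-state.


-- ===== PORT A =====
-- A, step for step: for bitmask in range(2**n), rebuild the candidate string char by char
-- (combo kept as List Char, turned into a String when appended) while collecting the set of
-- replaced characters; keep combos whose set has exactly one element.
-- '(bitmask >> i) & 1' is ported in place as '>>> i.toNat' (i ranges over range(0, n), so
-- i.toNat is exact) with PySem.Int.band.
def get_masked_numbers (num : Int) : List String :=
  (PySem.List.pyRange 0 (2 ^ (PySem.Int.toChars num).length) 1).foldl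
    (fun (result : List String) (bitmask : Int) =>
      let p := (PySem.List.pyRange 0 ((PySem.Int.toChars num).length : Int) 1).foldl
        (fun (q : List Char × PySem.Set Char) (i : Int) =>
          if PySem.Int.band (bitmask >>> i.toNat) 1 ≠ 0 then
            (q.1 ++ ['*'], PySem.Set.add q.2 (PySem.List.pyGetD (PySem.Int.toChars num) i ' '))
          else
            (q.1 ++ [PySem.List.pyGetD (PySem.Int.toChars num) i ' '], q.2))
        ([], PySem.Set.empty)
      if PySem.List.len p.2 == 1 then result ++ [String.ofList p.1] else result)
    []

-- ===== PORT B =====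
-- B-side helper: the doubling loop of Source B — each character either stays (state kept) or is
-- starred (state merged: none = no star yet, some [c] = all stars replaced c, some [] = conflict,
-- mirroring Source B's None / ch / '').
def pvVariants (s : List Char) : List (List Char × Option (List Char)) :=
  s.foldl
    (fun (vs : List (List Char × Option (List Char))) (ch : Char) =>
      vs.map (fun p => (p.1 ++ [ch], p.2)) ++
      vs.map (fun p =>
        (p.1 ++ ['*'], if p.2 = none ∨ p.2 = some [ch] then some [ch] else some [])))
    [([], none)]

def get_masked_numbers_alt (num : Int) : List String :=
  ((pvVariants (PySem.Int.toChars num)).filter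
      (fun p => decide (p.2 ≠ none ∧ p.2 ≠ some []))).map
    (fun p => String.ofList p.1)

-- ===== PRECONDITION & SPEC =====
def Spec_get_masked_numbers (num : Int) (out : List String) : Prop := out = get_masked_numbers_alt num
instance (num : Int) (out : List String) : Decidable (Spec_get_masked_numbers num out) := by unfold Spec_get_masked_numbers; infer_instance

-- ===== CLAIM (what is proved, stated in full; the proofs are below) =====
def Claim_equal_get_masked_numbers : Prop := ∀ (num : Int), Dom_get_masked_numbers num → Spec_get_masked_numbers num (get_masked_numbers num)

-- ===== LEMMAS AND PROOFS =====

-- A's inner loop at Nat level: position k of s is starred iff bit k of b is set.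
def pvStep (s : List Char) (b : Nat) (q : List Char × PySem.Set Char) (k : Nat) :
    List Char × PySem.Set Char :=
  if (b >>> k) &&& 1 ≠ 0 then (q.1 ++ ['*'], PySem.Set.add q.2 (s.getD k ' '))
  else (q.1 ++ [s.getD k ' '], q.2)

def pvInner (s : List Char) (b : Nat) : List Char × PySem.Set Char :=
  (List.range s.length).foldl (pvStep s b) ([], PySem.Set.empty)

-- abstraction of A's set of replaced chars to B's three-valued state
def pvAbst : List Char → Option (List Char)
  | [] => none
  | [c] => some [c]
  | _ :: _ :: _ => some []

lemma pvBit_iff (b k : Nat) : ((b >>> k) &&& 1 ≠ 0) ↔ Nat.testBit b k = true := by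
  rw [Nat.testBit]
  simp [Nat.and_comm]

lemma pvInner_snoc (s : List Char) (c : Char) (b : Nat) :
    pvInner (s ++ [c]) b =
      if (b >>> s.length) &&& 1 ≠ 0 then
        ((pvInner s b).1 ++ ['*'], PySem.Set.add (pvInner s b).2 c)
      else ((pvInner s b).1 ++ [c], (pvInner s b).2) := by
  unfold pvInner
  rw [show (s ++ [c]).length = s.length + 1 by simp, List.range_succ, List.foldl_append,
    PySem.List.foldl_congr_mem (List.range s.length) (pvStep (s ++ [c]) b) (pvStep s b)
      ([], PySem.Set.empty) (by
        intro acc k hk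
        have hk' : k < s.length := List.mem_range.mp hk
        unfold pvStep
        rw [List.getD_append s [c] ' ' k hk'])]
  simp only [List.foldl_cons, List.foldl_nil]
  unfold pvStep
  rw [List.getD_append_right s [c] ' ' s.length (le_refl s.length), Nat.sub_self]
  rfl

lemma pvInner_high (s : List Char) (b : Nat) :
    pvInner s (2 ^ s.length + b) = pvInner s b := by
  unfold pvInner
  apply PySem.List.foldl_congr_mem
  intro acc k hk
  have hk' : k < s.length := List.mem_range.mp hk
  have hiff : ((2 ^ s.length + b) >>> k) &&& 1 ≠ 0 ↔ (b >>> k) &&& 1 ≠ 0 := by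
    rw [pvBit_iff, pvBit_iff, Nat.testBit_two_pow_add_gt hk' b]
  unfold pvStep
  simp only [hiff]

lemma pvAbst_add (r : List Char) (c : Char) :
    pvAbst (PySem.Set.add r c) =
      if pvAbst r = none ∨ pvAbst r = some [c] then some [c] else some [] := by
  match r with
  | [] => simp [PySem.Set.add, pvAbst]
  | [d] =>
    by_cases hc : d = c
    · simp [PySem.Set.add, pvAbst, hc]
    · have hc' : ¬ (c = d) := fun h => hc h.symm
      simp [PySem.Set.add, pvAbst, hc, hc']
  | d :: e :: t =>
    unfold PySem.Set.add
    split <;> simp [pvAbst]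

lemma pvVariants_eq (s : List Char) :
    pvVariants s =
      (List.range (2 ^ s.length)).map
        (fun b => ((pvInner s b).1, pvAbst (pvInner s b).2)) := by
  induction s using List.reverseRecOn with
  | nil => rfl
  | append_singleton s c ih =>
    have hlhs : pvVariants (s ++ [c]) =
        (pvVariants s).map (fun p => (p.1 ++ [c], p.2)) ++
        (pvVariants s).map (fun p =>
          (p.1 ++ ['*'], if p.2 = none ∨ p.2 = some [c] then some [c] else some [])) := by
      unfold pvVariants
      rw [List.foldl_append, List.foldl_cons, List.foldl_nil]
    have hpow : 2 ^ (s ++ [c]).length = 2 ^ s.length + 2 ^ s.length := by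
      simp [pow_succ, Nat.mul_two]
    rw [hlhs, ih, hpow, List.range_add]
    simp only [List.map_append, List.map_map]
    congr 1
    · apply List.map_congr_left
      intro b hb
      have hb' : b < 2 ^ s.length := List.mem_range.mp hb
      have hcond : ¬ ((b >>> s.length) &&& 1 ≠ 0) := by
        rw [pvBit_iff]
        simp [Nat.testBit_eq_false_of_lt hb']
      simp only [Function.comp_apply]
      rw [pvInner_snoc, if_neg hcond]
    · apply List.map_congr_left
      intro b hb
      have hb' : b < 2 ^ s.length := List.mem_range.mp hb
      have hcond : (((2 ^ s.length + b) >>> s.length) &&& 1 ≠ 0) := by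
        rw [pvBit_iff, Nat.testBit_two_pow_add_eq, Nat.testBit_eq_false_of_lt hb']
        rfl
      simp only [Function.comp_apply]
      rw [pvInner_snoc, if_pos hcond, pvInner_high s b, pvAbst_add]

-- bridge: the Int-level inner loop of port A is pvInner
lemma pvInnerA_eq (s : List Char) (b : Nat) :
    (PySem.List.pyRange 0 (s.length : Int) 1).foldl
      (fun (q : List Char × PySem.Set Char) (i : Int) =>
        if PySem.Int.band (((b : Int)) >>> i.toNat) 1 ≠ 0 then
          (q.1 ++ ['*'], PySem.Set.add q.2 (PySem.List.pyGetD s i ' '))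
        else
          (q.1 ++ [PySem.List.pyGetD s i ' '], q.2))
      ([], PySem.Set.empty) = pvInner s b := by
  rw [PySem.List.pyRange_zero_nat, List.foldl_map]
  apply PySem.List.foldl_congr_mem
  intro acc k hk
  dsimp only
  have h2 : PySem.Int.band ((b : Int) >>> ((k : Int)).toNat) 1 = (((b >>> k) &&& 1 : Nat) : Int) := by
    rw [Int.toNat_natCast, ← Int.natCast_shiftRight,
      show (1 : Int) = ((1 : Nat) : Int) from rfl, PySem.Int.band_natCast]
  have h3 : (PySem.Int.band ((b : Int) >>> ((k : Int)).toNat) 1 ≠ 0) ↔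
      (((b >>> k) &&& 1 : Nat) ≠ 0) := by
    rw [h2]
    exact Int.natCast_ne_zero
  unfold pvStep
  simp only [h3, PySem.List.pyGetD_natCast]

lemma portA_eq (num : Int) :
    get_masked_numbers num =
      ((List.range (2 ^ (PySem.Int.toChars num).length)).filter
          (fun b => ((pvInner (PySem.Int.toChars num) b).2.length == 1))).map
        (fun b => String.ofList (pvInner (PySem.Int.toChars num) b).1) := by
  unfold get_masked_numbers
  rw [show ((2 : Int) ^ (PySem.Int.toChars num).length) =
      (((2 ^ (PySem.Int.toChars num).length : Nat)) : Int) by push_cast; ring]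
  rw [PySem.List.pyRange_zero_nat (2 ^ (PySem.Int.toChars num).length), List.foldl_map]
  refine Eq.trans (PySem.List.foldl_congr_mem _ _
    (fun (result : List String) (b : Nat) =>
      if ((pvInner (PySem.Int.toChars num) b).2.length == 1) then
        result ++ [String.ofList (pvInner (PySem.Int.toChars num) b).1]
      else result) _ ?_) ?_
  · intro acc b _
    dsimp only
    rw [pvInnerA_eq (PySem.Int.toChars num) b]
    simp [PySem.List.len_eq]
  · rw [PySem.List.foldl_append_if]
    simp
lemma pred_eq (r : List Char) :
    (decide (pvAbst r ≠ none ∧ pvAbst r ≠ some [])) = (r.length == 1) := by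
  match r with
  | [] => simp [pvAbst]
  | [c] => simp [pvAbst]
  | d :: e :: t => simp [pvAbst]

-- ===== VERDICT (by name: the statement is the Claim_ definition above) =====
theorem get_masked_numbers_spec : Claim_equal_get_masked_numbers := by
  intro num _
  unfold Spec_get_masked_numbers get_masked_numbers_alt
  rw [portA_eq, pvVariants_eq, List.filter_map, List.map_map]
  have hfil : List.filter ((fun (p : List Char × Option (List Char)) =>
        decide (p.2 ≠ none ∧ p.2 ≠ some [])) ∘ (fun b =>
          ((pvInner (PySem.Int.toChars num) b).1, pvAbst (pvInner (PySem.Int.toChars num) b).2)))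
        (List.range (2 ^ (PySem.Int.toChars num).length)) =
      List.filter (fun b => ((pvInner (PySem.Int.toChars num) b).2.length == 1))
        (List.range (2 ^ (PySem.Int.toChars num).length)) := by
    apply List.filter_congr
    intro b _
    exact pred_eq ((pvInner (PySem.Int.toChars num) b).2)
  rw [hfil]
  apply List.map_congr_left
  intro b _
  rfl
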